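-- pv_equiv track=rewrite | github.com/jeffdshen/lux-s2 | anim/nav.py | get_power_cycle
-- ===== SOURCE A (Python) =====
-- def get_power_cycle(
--     power: int, start_step: int, max_step: int, cycle_length: int, day_length: int
-- ):
--     cycle = {}
--     for step in range(start_step, max_step):
--         cycle[step] = power
--         power += (step % cycle_length) < day_length
--     return cycle
-- ===== SOURCE B (Python) =====
-- def get_power_cycle(
--     power: int, start_step: int, max_step: int, cycle_length: int, day_length: int
-- ):
--     def charged(x):
--         # number of steps t in [0, x) that fall in the day part of the cycle
--         full, rem = divmod(x, cycle_length)
--         day = min(max(day_length, 0), cycle_length)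
--         return full * day + min(max(day_length, 0), rem)
--
--     return {
--         step: power + charged(step) - charged(start_step)
--         for step in range(start_step, max_step)
--     }
-- ===== Notes on version B (the rewrite author's own statement) =====
-- stated objective: alternative
-- what changed: Replaces A's running accumulator over the range by a per-step closed-form count of day steps (full-cycle floordiv/mod arithmetic), so each map value is derived independently; Pre_ restricts a nonempty range to the natural domain of a positive cycle_length: at cycle_length == 0 both programs raise ZeroDivisionError, and a negative cycle length is outside the day/night-cycle domain this function models, where A's value is an artefact of Python's negative-divisor modulo.
-- outside the precondition, e.g. on get_power_cycle(-9, 0, 3, -5, -2): A returns {0: -9, 1: -9, 2: -8}, B returns {0: -9, 1: -8, 2: -7}; on get_power_cycle(0, 0, 2, 0, 1): A raises ZeroDivisionError, B raises ZeroDivisionError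
import Mathlib
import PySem

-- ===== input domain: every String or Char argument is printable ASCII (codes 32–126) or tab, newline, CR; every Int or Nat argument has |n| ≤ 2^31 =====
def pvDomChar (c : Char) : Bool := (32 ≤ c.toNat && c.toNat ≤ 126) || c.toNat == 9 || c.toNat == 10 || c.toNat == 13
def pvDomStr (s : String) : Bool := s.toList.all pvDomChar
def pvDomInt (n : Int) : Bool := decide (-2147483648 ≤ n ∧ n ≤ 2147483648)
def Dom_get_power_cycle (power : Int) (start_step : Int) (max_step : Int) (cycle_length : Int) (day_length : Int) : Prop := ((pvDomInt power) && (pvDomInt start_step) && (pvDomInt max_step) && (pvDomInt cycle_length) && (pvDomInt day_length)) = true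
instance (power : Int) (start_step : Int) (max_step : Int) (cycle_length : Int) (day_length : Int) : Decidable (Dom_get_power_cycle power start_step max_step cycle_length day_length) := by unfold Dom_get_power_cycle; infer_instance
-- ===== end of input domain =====

-- B derives each map value independently from a closed-form count of day steps
-- instead of threading A's running accumulator; objective: alternative.

-- ===== PORT A =====
-- A: loop over range(start_step, max_step), insert step ↦ power, then bump power
-- by the 0/1 indicator (step % cycle_length) < day_length.
def get_power_cycle (power : Int) (start_step : Int) (max_step : Int) (cycle_length : Int) (day_length : Int) : List (Int × Int) :=
  (((PySem.List.pyRange start_step max_step 1).foldl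
      (fun (st : PySem.Dict Int Int × Int) step =>
        (st.1.insert step st.2,
         st.2 + (if PySem.Int.mod step cycle_length < day_length then 1 else 0)))
      (PySem.Dict.empty, power)).1).items

-- ===== PORT B =====
-- Source B's charged(x): number of steps t in [0, x) in the day part of the cycle.
def pvCharged (c : Int) (d : Int) (x : Int) : Int :=
  PySem.Int.floordiv x c * min (max d 0) c + min (max d 0) (PySem.Int.mod x c)

def get_power_cycle_alt (power : Int) (start_step : Int) (max_step : Int) (cycle_length : Int) (day_length : Int) : List (Int × Int) :=
  (PySem.List.pyRange start_step max_step 1).map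
    (fun step => (step,
      power + pvCharged cycle_length day_length step
        - pvCharged cycle_length day_length start_step))

-- ===== PRECONDITION & SPEC =====
-- Pre_ restricts a nonempty range to the function's natural domain of a positive
-- cycle_length: at cycle_length == 0 both programs raise ZeroDivisionError, and a
-- negative cycle length is outside the day/night-cycle domain this function models
-- (there A's value is an artefact of Python's negative-divisor modulo).
def Pre_get_power_cycle (power : Int) (start_step : Int) (max_step : Int) (cycle_length : Int) (day_length : Int) : Prop :=
  0 < cycle_length ∨ max_step ≤ start_step
instance (power : Int) (start_step : Int) (max_step : Int) (cycle_length : Int) (day_length : Int) : Decidable (Pre_get_power_cycle power start_step max_step cycle_length day_length) := by unfold Pre_get_power_cycle; infer_instance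

def pvWitness_get_power_cycle : Int × Int × Int × Int × Int := (3, -2, 5, 4, 2)

def Spec_get_power_cycle (power : Int) (start_step : Int) (max_step : Int) (cycle_length : Int) (day_length : Int) (out : List (Int × Int)) : Prop := out = get_power_cycle_alt power start_step max_step cycle_length day_length
instance (power : Int) (start_step : Int) (max_step : Int) (cycle_length : Int) (day_length : Int) (out : List (Int × Int)) : Decidable (Spec_get_power_cycle power start_step max_step cycle_length day_length out) := by unfold Spec_get_power_cycle; infer_instance

-- ===== CLAIM (what is proved, stated in full; the proofs are below) =====
def Claim_equal_get_power_cycle : Prop := ∀ (power : Int) (start_step : Int) (max_step : Int) (cycle_length : Int) (day_length : Int), Dom_get_power_cycle power start_step max_step cycle_length day_length → Pre_get_power_cycle power start_step max_step cycle_length day_length → Spec_get_power_cycle power start_step max_step cycle_length day_length (get_power_cycle power start_step max_step cycle_length day_length)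

-- ===== LEMMAS AND PROOFS =====

-- how Python floordiv/mod (positive divisor) evolve when the argument grows by 1
lemma pvStep (m x : Int) (hm : 0 < m) :
    (PySem.Int.floordiv (x + 1) m = PySem.Int.floordiv x m ∧
      PySem.Int.mod (x + 1) m = PySem.Int.mod x m + 1) ∨
    (PySem.Int.mod x m = m - 1 ∧
      PySem.Int.floordiv (x + 1) m = PySem.Int.floordiv x m + 1 ∧
      PySem.Int.mod (x + 1) m = 0) := by
  have h1 := PySem.Int.floordiv_mul_add_mod x m
  have h3 := PySem.Int.mod_nonneg x hm
  have h4 := PySem.Int.mod_lt x hm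
  have hexp : (PySem.Int.floordiv x m + 1) * m = PySem.Int.floordiv x m * m + m := by ring
  by_cases hr : PySem.Int.mod x m + 1 < m
  · left
    have hq : PySem.Int.floordiv (x + 1) m = PySem.Int.floordiv x m := by
      rw [PySem.Int.floordiv_eq_iff_of_pos hm]; omega
    have h2 := PySem.Int.floordiv_mul_add_mod (x + 1) m
    rw [hq] at h2
    exact ⟨hq, by omega⟩
  · right
    have hexp2 : (PySem.Int.floordiv x m + 1 + 1) * m =
        PySem.Int.floordiv x m * m + m + m := by ring
    have hq : PySem.Int.floordiv (x + 1) m = PySem.Int.floordiv x m + 1 := by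
      rw [PySem.Int.floordiv_eq_iff_of_pos hm]; omega
    have h2 := PySem.Int.floordiv_mul_add_mod (x + 1) m
    rw [hq] at h2
    rw [hexp] at h2
    exact ⟨by omega, hq, by omega⟩

-- charged increments by exactly A's per-step indicator
lemma pvCharged_succ (c d x : Int) (hc : 0 < c) :
    pvCharged c d (x + 1) =
      pvCharged c d x + (if PySem.Int.mod x c < d then 1 else 0) := by
  have h3 := PySem.Int.mod_nonneg x hc
  have h4 := PySem.Int.mod_lt x hc
  simp only [pvCharged]
  rcases pvStep c x hc with ⟨hq, hr⟩ | ⟨htop, hq, hr⟩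
  · rw [hq, hr]
    split_ifs <;> omega
  · rw [hq, hr, htop]
    have hexp : (PySem.Int.floordiv x c + 1) * min (max d 0) c =
        PySem.Int.floordiv x c * min (max d 0) c + min (max d 0) c := by ring
    rw [hexp]
    split_ifs <;> omega

-- the loop invariant: folding A's body over range(a, b) appends the closed-form pairs
-- and leaves power advanced by charged(b) - charged(a).
lemma foldA_eq (c d : Int) (hc : 0 < c) :
    ∀ (n : Nat) (a b power : Int) (dict : PySem.Dict Int Int),
      (b - a).toNat = n →
      (∀ k, dict.contains k = true → k < a) →
      (PySem.List.pyRange a b 1).foldl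
          (fun (st : PySem.Dict Int Int × Int) step =>
            (st.1.insert step st.2,
             st.2 + (if PySem.Int.mod step c < d then 1 else 0)))
          (dict, power) =
        (PySem.Dict.mk (dict.items ++
            (PySem.List.pyRange a b 1).map
              (fun step => (step, power + pvCharged c d step - pvCharged c d a))),
         power + pvCharged c d (max a b) - pvCharged c d a) := by
  intro n
  induction n with
  | zero =>
    intro a b power dict hn hk
    have hba : b ≤ a := by omega
    rw [PySem.List.pyRange_one_eq_nil hba]
    simp [max_eq_left hba]
  | succ m ih =>
    intro a b power dict hn hk
    have hab : a < b := by omega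
    rw [PySem.List.pyRange_one_cons hab]
    simp only [List.foldl_cons, List.map_cons]
    have hfresh : dict.contains a = false := by
      cases h : dict.contains a with
      | false => rfl
      | true => exact absurd (hk a h) (lt_irrefl a)
    rw [ih (a + 1) b (power + (if PySem.Int.mod a c < d then 1 else 0))
          (dict.insert a power) (by omega)
          (fun k hkk => by
            rcases (PySem.Dict.contains_iff_mem_keys _ _).mp hkk with hmem
            rcases (PySem.Dict.mem_keys_insert _ _ _ _).mp hmem with h | h
            · omega
            · have := hk k ((PySem.Dict.contains_iff_mem_keys _ _).mpr h)
              omega)]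
    have hsucc := pvCharged_succ c d a hc
    have hmax : max (a + 1) b = max a b := by omega
    rw [PySem.Dict.items_insert_of_not_contains _ _ hfresh]
    simp only [Prod.mk.injEq]
    refine ⟨?_, by rw [hmax]; omega⟩
    congr 1
    rw [List.append_assoc]
    congr 1
    simp only [List.singleton_append, List.cons.injEq, Prod.mk.injEq]
    refine ⟨⟨trivial, by omega⟩, ?_⟩
    apply List.map_congr_left
    intro step hstep
    simp only [Prod.mk.injEq, true_and]
    omega

theorem pv_main (power start_step max_step cycle_length day_length : Int)
    (hc : 0 < cycle_length) :
    get_power_cycle power start_step max_step cycle_length day_length =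
      get_power_cycle_alt power start_step max_step cycle_length day_length := by
  unfold get_power_cycle get_power_cycle_alt
  rw [foldA_eq cycle_length day_length hc ((max_step - start_step).toNat)
      start_step max_step power PySem.Dict.empty rfl
      (fun k hkk => by simp [PySem.Dict.contains_empty] at hkk)]
  simp [PySem.Dict.empty]

-- ===== VERDICT (by name: the statement is the Claim_ definition above) =====
theorem get_power_cycle_spec : Claim_equal_get_power_cycle := by
  intro power start_step max_step cycle_length day_length _ hpre
  unfold Spec_get_power_cycle
  rcases hpre with hc | hle
  · exact pv_main power start_step max_step cycle_length day_length hc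
  · unfold get_power_cycle get_power_cycle_alt
    rw [PySem.List.pyRange_one_eq_nil hle]
    simp [PySem.Dict.empty]
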